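-- pv_equiv track=rewrite | github.com/obinopaul/malibu | archive/old_malibu/malibu/server/security.py | _split_on_operators
-- ===== SOURCE A (Python) =====
-- def _split_on_operators(cmd: str) -> list[str]:
--     """Split on &&, ||, ; while being mindful of quoting."""
--     parts: list[str] = []
--     current: list[str] = []
--     i = 0
--     in_single = False
--     in_double = False
--     while i < len(cmd):
--         c = cmd[i]
--         if c == "'" and not in_double:
--             in_single = not in_single
--             current.append(c)
--         elif c == '"' and not in_single:
--             in_double = not in_double
--             current.append(c)
--         elif not in_single and not in_double:
--             if c == ";" or (c == "&" and i + 1 < len(cmd) and cmd[i + 1] == "&"):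
--                 parts.append("".join(current))
--                 current = []
--                 if c == "&":
--                     i += 1  # skip second &
--             elif c == "|" and i + 1 < len(cmd) and cmd[i + 1] == "|":
--                 parts.append("".join(current))
--                 current = []
--                 i += 1  # skip second |
--             else:
--                 current.append(c)
--         else:
--             current.append(c)
--         i += 1
--     if current:
--         parts.append("".join(current))
--     return parts
-- ===== SOURCE B (Python) =====
-- def _split_on_operators(cmd: str) -> list[str]:
--     """Split on &&, ||, ; while being mindful of quoting.
--
--     Different decomposition: a helper finds the FIRST unquoted operator and
--     returns (head, rest-after-operator); the outer loop repeatedly peels off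
--     heads, dropping only a trailing empty segment.
--     """
--     def split_first(s):
--         in_s = in_d = False
--         for j, c in enumerate(s):
--             if c == "'" and not in_d:
--                 in_s = not in_s
--             elif c == '"' and not in_s:
--                 in_d = not in_d
--             elif not in_s and not in_d:
--                 if c == ';':
--                     return s[:j], s[j + 1:]
--                 if c in ('&', '|') and s[j + 1:j + 2] == c:
--                     return s[:j], s[j + 2:]
--         return s, None
--
--     out = []
--     rest = cmd
--     while True:
--         head, tail = split_first(rest)
--         if tail is None:
--             if head:
--                 out.append(head)
--             return out
--         out.append(head)
--         rest = tail
-- ===== Notes on version B (the rewrite author's own statement) =====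
-- stated objective: alternative
-- what changed: Replaces A's single accumulator loop (char-by-char building of 'current' with in-place parts appends) by a find-first-unquoted-operator helper that returns (head, rest) via slicing, driven by an outer peel-off loop that drops only a trailing empty segment.
import Mathlib
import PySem

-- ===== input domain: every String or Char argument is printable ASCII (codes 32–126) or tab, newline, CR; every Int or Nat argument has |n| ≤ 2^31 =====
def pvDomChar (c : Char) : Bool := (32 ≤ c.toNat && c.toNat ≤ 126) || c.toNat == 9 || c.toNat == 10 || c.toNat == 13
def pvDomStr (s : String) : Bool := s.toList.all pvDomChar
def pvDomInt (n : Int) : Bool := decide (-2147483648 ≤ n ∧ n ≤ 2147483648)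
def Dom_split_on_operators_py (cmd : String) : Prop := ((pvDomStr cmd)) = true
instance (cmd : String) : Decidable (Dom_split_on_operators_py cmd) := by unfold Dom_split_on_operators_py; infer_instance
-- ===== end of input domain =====

-- B replaces A's single accumulator loop by a find-first-unquoted-operator helper
-- driven by a peel-off loop (objective: alternative decomposition, same cost).


-- ===== PORT A =====
-- A's while loop over indices, transliterated as structural recursion on the char
-- list: cmd[i+1] = head of the remaining list, 'i += 1 (skip)' = dropping it.
def pvGoA : List Char → Bool → Bool → List Char → List String → List String
  | [], _, _, cur, parts => if cur = [] then parts else parts ++ [String.ofList cur]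
  | c :: s, inS, inD, cur, parts =>
    if c = '\'' ∧ inD = false then pvGoA s (!inS) inD (cur ++ [c]) parts
    else if c = '"' ∧ inS = false then pvGoA s inS (!inD) (cur ++ [c]) parts
    else if inS = false ∧ inD = false then
      if c = ';' ∨ (c = '&' ∧ s.head? = some '&') then
        pvGoA (if c = '&' then s.tail else s) inS inD [] (parts ++ [String.ofList cur])
      else if c = '|' ∧ s.head? = some '|' then
        pvGoA s.tail inS inD [] (parts ++ [String.ofList cur])
      else pvGoA s inS inD (cur ++ [c]) parts
    else pvGoA s inS inD (cur ++ [c]) parts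
termination_by s => s.length
decreasing_by
  all_goals simp [List.length_tail]
  all_goals split <;> simp [List.length_tail]

def split_on_operators_py (cmd : String) : List String :=
  pvGoA cmd.toList false false [] []

-- ===== PORT B =====
-- split_first: returns (head, some rest) at the first unquoted operator, else
-- (whole string, none).  Python's s[:j] / s[j+k:] slices are rendered by the
-- structural recursion building the prefix and returning the suffix (exact).
def pvSplitFirst : List Char → Bool → Bool → List Char × Option (List Char)
  | [], _, _ => ([], none)
  | c :: s, inS, inD =>
    if c = '\'' ∧ inD = false then
      let p := pvSplitFirst s (!inS) inD; (c :: p.1, p.2)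
    else if c = '"' ∧ inS = false then
      let p := pvSplitFirst s inS (!inD); (c :: p.1, p.2)
    else if inS = false ∧ inD = false then
      if c = ';' then ([], some s)
      else if (c = '&' ∨ c = '|') ∧ s.head? = some c then ([], some s.tail)
      else let p := pvSplitFirst s inS inD; (c :: p.1, p.2)
    else let p := pvSplitFirst s inS inD; (c :: p.1, p.2)

-- termination of the peel-off loop: the rest returned is strictly shorter
theorem pvSplitFirst_some_length (s : List Char) (inS inD : Bool) (r : List Char)
    (h : (pvSplitFirst s inS inD).2 = some r) : r.length < s.length := by
  induction s generalizing inS inD with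
  | nil => simp [pvSplitFirst] at h
  | cons c s ih =>
    simp only [pvSplitFirst] at h
    split_ifs at h <;>
      first
        | (simp at h; omega)
        | (simp at h; subst h; simp)
        | (have := ih _ _ h; simp; omega)

def pvGoB (s : List Char) : List String :=
  match h : pvSplitFirst s false false with
  | (hd, none) => if hd = [] then [] else [String.ofList hd]
  | (hd, some r) => String.ofList hd :: pvGoB r
termination_by s.length
decreasing_by exact pvSplitFirst_some_length s false false r (by rw [h])

def split_on_operators_py_alt (cmd : String) : List String :=
  pvGoB cmd.toList

-- ===== PRECONDITION & SPEC =====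
def Spec_split_on_operators_py (cmd : String) (out : List String) : Prop := out = split_on_operators_py_alt cmd
instance (cmd : String) (out : List String) : Decidable (Spec_split_on_operators_py cmd out) := by unfold Spec_split_on_operators_py; infer_instance

-- ===== CLAIM (what is proved, stated in full; the proofs are below) =====
def Claim_equal_split_on_operators_py : Prop := ∀ (cmd : String), Dom_split_on_operators_py cmd → Spec_split_on_operators_py cmd (split_on_operators_py cmd)

-- ===== LEMMAS AND PROOFS =====

-- proof-only helper: B's result with a pending prefix `cur` glued onto the first segment
def pvGlue (cur s : List Char) (inS inD : Bool) : List String :=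
  match pvSplitFirst s inS inD with
  | (hd, none) => if cur ++ hd = [] then [] else [String.ofList (cur ++ hd)]
  | (hd, some r) => String.ofList (cur ++ hd) :: pvGoB r

theorem pvGoB_eq_glue (s : List Char) : pvGoB s = pvGlue [] s false false := by
  rw [pvGoB, pvGlue]
  rcases h : pvSplitFirst s false false with ⟨hd, _ | r⟩ <;> simp

theorem pvGlue_cons_other (cur : List Char) (c : Char) (s : List Char) (inS inD inS' inD' : Bool)
    (h : pvSplitFirst (c :: s) inS inD =
      (c :: (pvSplitFirst s inS' inD').1, (pvSplitFirst s inS' inD').2)) :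
    pvGlue cur (c :: s) inS inD = pvGlue (cur ++ [c]) s inS' inD' := by
  rw [pvGlue, pvGlue, h]
  rcases hp : pvSplitFirst s inS' inD' with ⟨hd, _ | r⟩ <;> simp

theorem pvMain (n : Nat) (s : List Char) (hn : s.length ≤ n) (inS inD : Bool)
    (cur : List Char) (parts : List String) :
    pvGoA s inS inD cur parts = parts ++ pvGlue cur s inS inD := by
  induction n generalizing s inS inD cur parts with
  | zero =>
    have : s = [] := List.eq_nil_of_length_eq_zero (by omega)
    subst this
    simp [pvGoA, pvGlue, pvSplitFirst]
    split <;> simp_all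
  | succ n ih =>
    match s with
    | [] =>
      simp [pvGoA, pvGlue, pvSplitFirst]
      split <;> simp_all
    | c :: s =>
      have hlen : s.length ≤ n := by simp at hn; omega
      rw [pvGoA]
      by_cases h1 : c = '\'' ∧ inD = false
      · rw [if_pos h1, ih s hlen,
            ← pvGlue_cons_other cur c s inS inD (!inS) inD (by rw [pvSplitFirst, if_pos h1])]
      · rw [if_neg h1]
        by_cases h2 : c = '"' ∧ inS = false
        · rw [if_pos h2, ih s hlen,
            ← pvGlue_cons_other cur c s inS inD inS (!inD) (by rw [pvSplitFirst, if_neg h1, if_pos h2])]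
        · rw [if_neg h2]
          by_cases h3 : inS = false ∧ inD = false
          · rw [if_pos h3]
            by_cases h4 : c = ';' ∨ (c = '&' ∧ s.head? = some '&')
            · rw [if_pos h4]
              rcases h4 with h4 | h4
              · -- semicolon
                subst h4
                obtain ⟨hS, hD⟩ := h3; subst hS; subst hD
                rw [if_neg (by simp), ih s hlen, ← pvGoB_eq_glue]
                have key : pvGlue cur (';' :: s) false false =
                    String.ofList cur :: pvGoB s := by
                  simp [pvGlue, pvSplitFirst]
                rw [key]; simp
              · -- double ampersand
                obtain ⟨hc, hh⟩ := h4; subst hc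
                obtain ⟨hS, hD⟩ := h3; subst hS; subst hD
                have htl : s.tail.length ≤ n := by
                  simp [List.length_tail]; omega
                rw [if_pos rfl, ih s.tail htl, ← pvGoB_eq_glue]
                have key : pvGlue cur ('&' :: s) false false =
                    String.ofList cur :: pvGoB s.tail := by
                  simp [pvGlue, pvSplitFirst, hh]
                rw [key]; simp
            · rw [if_neg h4]
              by_cases h5 : c = '|' ∧ s.head? = some '|'
              · obtain ⟨hc, hh⟩ := h5; subst hc
                obtain ⟨hS, hD⟩ := h3; subst hS; subst hD
                have htl : s.tail.length ≤ n := by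
                  simp [List.length_tail]; omega
                rw [if_pos (by exact ⟨rfl, hh⟩), ih s.tail htl, ← pvGoB_eq_glue]
                have key : pvGlue cur ('|' :: s) false false =
                    String.ofList cur :: pvGoB s.tail := by
                  simp [pvGlue, pvSplitFirst, hh]
                rw [key]; simp
              · rw [if_neg h5, ih s hlen,
                  ← pvGlue_cons_other cur c s inS inD inS inD (by
                    rw [pvSplitFirst, if_neg h1, if_neg h2, if_pos h3,
                        if_neg (by tauto), if_neg ?_]
                    intro ⟨hco, hh⟩
                    rcases hco with hc | hc <;> subst hc
                    · exact h4 (Or.inr ⟨rfl, hh⟩)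
                    · exact h5 ⟨rfl, hh⟩)]
          · rw [if_neg h3, ih s hlen,
              ← pvGlue_cons_other cur c s inS inD inS inD (by
                rw [pvSplitFirst, if_neg h1, if_neg h2, if_neg h3])]

-- ===== VERDICT (by name: the statement is the Claim_ definition above) =====
theorem split_on_operators_py_spec : Claim_equal_split_on_operators_py := by
  intro cmd _
  show split_on_operators_py cmd = split_on_operators_py_alt cmd
  rw [split_on_operators_py, split_on_operators_py_alt,
      pvMain cmd.toList.length cmd.toList le_rfl, pvGoB_eq_glue]
  simp
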